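-- pv_equiv track=rewrite | github.com/jon-mears/euclidean-love-engine | glsnake/new-component.py | GenerateHPPFilename
-- ===== SOURCE A (Python) =====
-- def GenerateHPPFilename(component : str) -> str:
--     filename = ''
--
--     for i in range(len(component)):
--         filename += component[i]
--         if i < len(component)-1:
--             if component[i+1].isupper():
--                 filename += '-'
--
--     filename = filename.lower()
--     filename += '.hpp'
--
--     return filename
-- ===== SOURCE B (Python) =====
-- def GenerateHPPFilename(component : str) -> str:
--     parts = []
--     current = ''
--     for c in component:
--         if c.isupper() and current:
--             parts.append(current)
--             current = c
--         else:
--             current += c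
--     if current:
--         parts.append(current)
--     return '-'.join(parts).lower() + '.hpp'
-- ===== Notes on version B (the rewrite author's own statement) =====
-- stated objective: faster
-- what changed: B splits the name into CamelCase word groups with a current-buffer/parts accumulator and joins the groups with hyphens, instead of A's index loop that looks ahead one character and appends to a string inline; the quadratic string concatenation disappears.
import Mathlib
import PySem

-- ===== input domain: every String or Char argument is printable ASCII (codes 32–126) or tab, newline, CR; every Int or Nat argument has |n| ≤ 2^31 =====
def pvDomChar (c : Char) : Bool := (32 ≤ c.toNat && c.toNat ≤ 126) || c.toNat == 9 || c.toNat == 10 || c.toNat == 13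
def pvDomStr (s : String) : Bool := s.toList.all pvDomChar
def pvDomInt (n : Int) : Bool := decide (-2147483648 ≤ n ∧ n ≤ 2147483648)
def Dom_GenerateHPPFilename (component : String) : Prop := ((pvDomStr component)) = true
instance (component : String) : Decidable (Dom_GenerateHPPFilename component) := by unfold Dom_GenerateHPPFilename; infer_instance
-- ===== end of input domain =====

-- B builds the CamelCase word groups into a parts list and joins them with '-', instead of
-- A's inline one-character-lookahead hyphen insertion; alternative decomposition, same result.

-- ===== PORT A =====
-- the for-i loop of A: emit component[i], then '-' when i < len-1 and component[i+1] is upper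
def pvALoop : List Char → List Char
  | [] => []
  | c :: rest =>
    c :: ((if h : rest ≠ [] then (if PySem.Chars.isupper (rest.head h) then ['-'] else []) else []) ++ pvALoop rest)

def GenerateHPPFilename (component : String) : String :=
  String.ofList (PySem.Chars.lower (pvALoop component.toList) ++ ".hpp".toList)

-- ===== PORT B =====
-- the for-c loop of B: (parts, current) accumulator, new group at an uppercase char
def pvBLoop : List Char → List (List Char) → List Char → List (List Char) × List Char
  | [], parts, current => (parts, current)
  | c :: rest, parts, current =>
    if PySem.Chars.isupper c ∧ current ≠ [] then pvBLoop rest (parts ++ [current]) [c]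
    else pvBLoop rest parts (current ++ [c])

def GenerateHPPFilename_alt (component : String) : String :=
  let (parts, current) := pvBLoop component.toList [] []
  let parts := if current ≠ [] then parts ++ [current] else parts
  String.ofList (PySem.Chars.lower (PySem.Chars.join ['-'] parts) ++ ".hpp".toList)

-- ===== PRECONDITION & SPEC =====
def Spec_GenerateHPPFilename (component : String) (out : String) : Prop := out = GenerateHPPFilename_alt component
instance (component : String) (out : String) : Decidable (Spec_GenerateHPPFilename component out) := by unfold Spec_GenerateHPPFilename; infer_instance

-- ===== CLAIM (what is proved, stated in full; the proofs are below) =====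
def Claim_equal_GenerateHPPFilename : Prop := ∀ (component : String), Dom_GenerateHPPFilename component → Spec_GenerateHPPFilename component (GenerateHPPFilename component)

-- ===== LEMMAS AND PROOFS =====

-- the tail of A's loop output: a dash-prefixed continuation after the first char
def pvTail : List Char → List Char
  | [] => []
  | c :: rest => (if PySem.Chars.isupper c then ['-'] else []) ++ c :: pvTail rest

lemma pvALoop_eq_tail (c : Char) (rest : List Char) :
    pvALoop (c :: rest) = c :: pvTail rest := by
  induction rest generalizing c with
  | nil => simp [pvALoop, pvTail]
  | cons d r ih =>
    show c :: ((if h : (d :: r) ≠ [] then (if PySem.Chars.isupper ((d :: r).head h) then ['-'] else []) else []) ++ pvALoop (d :: r)) = _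
    rw [ih d]
    simp [pvTail]

lemma pv_join_append (sep : List Char) (parts : List (List Char)) (x : List Char) :
    PySem.Chars.join sep (parts ++ [x]) =
      PySem.Chars.join sep parts ++ (if parts = [] then [] else sep) ++ x := by
  induction parts with
  | nil => simp [PySem.Chars.join_nil, PySem.Chars.join_singleton]
  | cons p ps ih =>
    cases ps with
    | nil => simp [PySem.Chars.join_singleton, PySem.Chars.join_cons_cons]
    | cons q qs =>
      simp only [List.cons_append] at ih ⊢
      simp [PySem.Chars.join_cons_cons, ih]

def pvFinalize (st : List (List Char) × List Char) : List Char :=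
  PySem.Chars.join ['-'] (if st.2 ≠ [] then st.1 ++ [st.2] else st.1)

lemma pvBLoop_invariant (cs : List Char) (parts : List (List Char)) (current : List Char)
    (h : current ≠ []) :
    pvFinalize (pvBLoop cs parts current) =
      PySem.Chars.join ['-'] parts ++ (if parts = [] then [] else ['-']) ++ current ++ pvTail cs := by
  induction cs generalizing parts current with
  | nil => simp [pvBLoop, pvFinalize, pvTail, h, pv_join_append]
  | cons c rest ih =>
    by_cases hu : PySem.Chars.isupper c = true
    · simp only [pvBLoop, hu, h, ne_eq, not_false_iff, if_pos, and_self]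
      rw [ih (parts ++ [current]) [c] (by simp)]
      simp [pv_join_append, pvTail, hu]
    · have : ¬ (PySem.Chars.isupper c = true ∧ current ≠ []) := by simp [hu]
      simp only [pvBLoop, this, if_neg, not_false_iff]
      rw [ih parts (current ++ [c]) (by simp)]
      simp [pvTail, hu]

lemma pv_core_eq (cs : List Char) :
    pvALoop cs = pvFinalize (pvBLoop cs [] []) := by
  cases cs with
  | nil => simp [pvALoop, pvBLoop, pvFinalize, PySem.Chars.join_nil]
  | cons c rest =>
    have h1 : pvBLoop (c :: rest) [] [] = pvBLoop rest [] [c] := by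
      simp [pvBLoop]
    rw [h1, pvBLoop_invariant rest [] [c] (by simp)]
    simp [pvALoop_eq_tail, PySem.Chars.join_nil]

-- ===== VERDICT (by name: the statement is the Claim_ definition above) =====
theorem GenerateHPPFilename_spec : Claim_equal_GenerateHPPFilename := by
  intro component _
  unfold Spec_GenerateHPPFilename GenerateHPPFilename GenerateHPPFilename_alt
  rw [pv_core_eq component.toList]
  rfl
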